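-- pv_equiv track=rewrite | github.com/Boyuridod/Processamento-Digital-de-Imagem | Codigos/A1E1-img2gray.py | trataCaminho
-- ===== SOURCE A (Python) =====
-- def trataCaminho(caminhoDaImagem):
--
--     caminho = ""
--
--     for i in range(len(caminhoDaImagem)):
--         if(i != 0 and i != len(caminhoDaImagem) - 1):
--             caminho += caminhoDaImagem[i]
--         else:
--             if(caminhoDaImagem[i] != '"'):
--                 caminho += caminhoDaImagem[i]
--
--     return caminho
-- ===== SOURCE B (Python) =====
-- def trataCaminho(caminhoDaImagem):
--     s = caminhoDaImagem
--     if s and s[0] == '"':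
--         s = s[1:]
--     if s and s[-1] == '"':
--         s = s[:-1]
--     return s
-- ===== Notes on version B (the rewrite author's own statement) =====
-- stated objective: simpler
-- what changed: Replaced A's per-index loop that rebuilds the string character by character with two endpoint guards plus slicing: drop one leading and one trailing quote directly.
import Mathlib
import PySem

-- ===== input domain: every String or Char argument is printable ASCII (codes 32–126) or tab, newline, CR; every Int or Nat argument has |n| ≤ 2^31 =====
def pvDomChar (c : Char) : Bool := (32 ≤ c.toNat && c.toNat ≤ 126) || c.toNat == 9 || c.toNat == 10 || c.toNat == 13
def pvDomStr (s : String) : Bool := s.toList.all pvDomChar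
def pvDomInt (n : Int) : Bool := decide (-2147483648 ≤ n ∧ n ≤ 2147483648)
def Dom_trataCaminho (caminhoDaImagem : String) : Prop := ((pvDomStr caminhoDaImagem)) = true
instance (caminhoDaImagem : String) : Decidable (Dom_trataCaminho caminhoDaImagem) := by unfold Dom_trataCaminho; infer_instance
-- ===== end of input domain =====

-- B replaces A's per-index filtering loop with two endpoint guards plus slicing (simpler; same values).

-- ===== PORT A =====
-- literal port of A's index loop; indices drawn from range(len) are always in range, so pyGetD's default is never read
def trataCaminho (caminhoDaImagem : String) : String :=
  let cs := caminhoDaImagem.toList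
  let n : Int := (cs.length : Int)
  let caminho : List Char :=
    (PySem.List.pyRange 0 n 1).foldl
      (fun acc i =>
        if i ≠ 0 ∧ i ≠ n - 1 then
          acc ++ [PySem.List.pyGetD cs i ' ']
        else
          if PySem.List.pyGetD cs i ' ' ≠ '"' then acc ++ [PySem.List.pyGetD cs i ' ']
          else acc)
      []
  String.ofList caminho

-- ===== PORT B =====
-- s[1:] on a nonempty list is drop 1, s[:-1] is dropLast, s[-1] is getLast?: exact on these guarded uses
def trataCaminho_alt (caminhoDaImagem : String) : String :=
  let s0 := caminhoDaImagem.toList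
  let s1 := if s0 ≠ [] ∧ s0.headI = '"' then s0.drop 1 else s0
  let s2 := if s1 ≠ [] ∧ s1.getLast? = some '"' then s1.dropLast else s1
  String.ofList s2

-- ===== PRECONDITION & SPEC =====
def Spec_trataCaminho (caminhoDaImagem : String) (out : String) : Prop := out = trataCaminho_alt caminhoDaImagem
instance (caminhoDaImagem : String) (out : String) : Decidable (Spec_trataCaminho caminhoDaImagem out) := by unfold Spec_trataCaminho; infer_instance

-- ===== CLAIM (what is proved, stated in full; the proofs are below) =====
def Claim_equal_trataCaminho : Prop := ∀ (caminhoDaImagem : String), Dom_trataCaminho caminhoDaImagem → Spec_trataCaminho caminhoDaImagem (trataCaminho caminhoDaImagem)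

-- ===== LEMMAS AND PROOFS =====

-- A's per-index contribution, as a list-valued function of the index
def pvStepA (cs : List Char) (i : Int) : List Char :=
  if i ≠ 0 ∧ i ≠ (cs.length : Int) - 1 then [PySem.List.pyGetD cs i ' ']
  else if PySem.List.pyGetD cs i ' ' ≠ '"' then [PySem.List.pyGetD cs i ' '] else []

lemma pvFlatMap_singleton {α β : Type} (g : α → List β) (h : α → β) :
    ∀ (l : List α), (∀ i ∈ l, g i = [h i]) → l.flatMap g = l.map h := by
  intro l
  induction l with
  | nil => intro _; rfl
  | cons x xs ih =>
    intro hx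
    simp [List.flatMap_cons, hx x (List.mem_cons_self), ih (fun i hi => hx i (List.mem_cons_of_mem _ hi))]

lemma pvFoldA (cs : List Char) :
    (PySem.List.pyRange 0 (cs.length : Int) 1).foldl
      (fun acc i =>
        if i ≠ 0 ∧ i ≠ (cs.length : Int) - 1 then
          acc ++ [PySem.List.pyGetD cs i ' ']
        else
          if PySem.List.pyGetD cs i ' ' ≠ '"' then acc ++ [PySem.List.pyGetD cs i ' ']
          else acc)
      []
    = (PySem.List.pyRange 0 (cs.length : Int) 1).flatMap (pvStepA cs) := by
  have hstep : (fun (acc : List Char) (i : Int) =>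
      if i ≠ 0 ∧ i ≠ (cs.length : Int) - 1 then
        acc ++ [PySem.List.pyGetD cs i ' ']
      else
        if PySem.List.pyGetD cs i ' ' ≠ '"' then acc ++ [PySem.List.pyGetD cs i ' ']
        else acc)
      = fun acc i => acc ++ pvStepA cs i := by
    funext acc i
    unfold pvStepA
    split_ifs <;> simp
  rw [hstep, PySem.List.foldl_append_eq_flatMap]
  simp

-- list-level equality of the two algorithms
lemma pvKey (cs : List Char) :
    (PySem.List.pyRange 0 (cs.length : Int) 1).flatMap (pvStepA cs)
    = (let s1 := if cs ≠ [] ∧ cs.headI = '"' then cs.drop 1 else cs;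
       if s1 ≠ [] ∧ s1.getLast? = some '"' then s1.dropLast else s1) := by
  match cs with
  | [] => simp [PySem.List.pyRange]
  | [c] =>
    by_cases hc : c = '"' <;>
      simp [hc, PySem.List.pyRange, pvStepA, PySem.List.pyGetD, PySem.List.pyGet?, PySem.List.pyIdx?]
  | c :: cs' =>
    rcases List.eq_nil_or_concat cs' with h | ⟨ms, d, h⟩
    · subst h
      by_cases hc : c = '"' <;>
        simp [hc, PySem.List.pyRange, pvStepA, PySem.List.pyGetD, PySem.List.pyGet?, PySem.List.pyIdx?]
    · rw [List.concat_eq_append] at h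
      subst h
      set cs := c :: (ms ++ [d]) with hcs
      have hn : (cs.length : Int) = (ms.length : Int) + 2 := by simp [hcs]; omega
      -- split the index range at 1 and at n-1
      have hsplit : PySem.List.pyRange 0 (cs.length : Int) 1
          = [0] ++ PySem.List.pyRange 1 ((cs.length : Int) - 1) 1 ++ [(cs.length : Int) - 1] := by
        rw [PySem.List.pyRange_one_append 0 1 (cs.length : Int) (by omega) (by omega),
            PySem.List.pyRange_one_append 1 ((cs.length : Int) - 1) (cs.length : Int) (by omega) (by omega)]
        have h1 : PySem.List.pyRange 0 1 1 = [0] := by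
          have := PySem.List.pyRange_one_singleton (0 : Int); simpa using this
        have h2 : PySem.List.pyRange ((cs.length : Int) - 1) (cs.length : Int) 1
            = [(cs.length : Int) - 1] := by
          have := PySem.List.pyRange_one_singleton ((cs.length : Int) - 1)
          rw [show (cs.length : Int) - 1 + 1 = (cs.length : Int) by omega] at this
          exact this
        rw [h1, h2]; simp
      rw [hsplit]
      -- endpoint characters
      have hget0 : PySem.List.pyGetD cs 0 ' ' = c := by
        rw [PySem.List.pyGetD_eq_getElem cs ' ' (by omega) (by simp [hcs]; omega)]
        simp [hcs]
      have hgetn : PySem.List.pyGetD cs ((cs.length : Int) - 1) ' ' = d := by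
        rw [PySem.List.pyGetD_eq_getElem cs ' ' (by omega) (by omega)]
        have ht : ((cs.length : Int) - 1).toNat = ms.length + 1 := by omega
        simp only [ht]
        simp [hcs]
      -- middle indices contribute exactly the middle characters
      have hmid : (PySem.List.pyRange 1 ((cs.length : Int) - 1) 1).flatMap (pvStepA cs) = ms := by
        have hone : ∀ i ∈ PySem.List.pyRange 1 ((cs.length : Int) - 1) 1,
            pvStepA cs i = [PySem.List.pyGetD cs i ' '] := by
          intro i hi
          rw [PySem.List.mem_pyRange_one] at hi
          unfold pvStepA
          rw [if_pos ⟨by omega, by omega⟩]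
        rw [pvFlatMap_singleton _ _ _ hone]
        apply List.ext_getElem
        · simp [PySem.List.length_pyRange_one, hcs]
        · intro k hk1 hk2
          have hk : k < ms.length := by
            simpa [PySem.List.length_pyRange_one, hn] using hk1
          rw [List.getElem_map, PySem.List.getElem_pyRange_one]
          rw [PySem.List.pyGetD_eq_getElem cs ' ' (by omega) (by rw [hn]; omega)]
          have ht : ((1 : Int) + (k : Int)).toNat = k + 1 := by omega
          simp only [ht]
          simp [hcs, List.getElem_append_left hk]
      simp only [List.flatMap_append, List.flatMap_cons, List.flatMap_nil, hmid]
      -- evaluate the two endpoint steps and the B side, in all four quote cases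
      have hA0 : pvStepA cs 0 = if c ≠ '"' then [c] else [] := by
        unfold pvStepA
        rw [if_neg (by simp), hget0]
      have hAn : pvStepA cs ((cs.length : Int) - 1) = if d ≠ '"' then [d] else [] := by
        unfold pvStepA
        rw [if_neg (by simp), hgetn]
      rw [hA0, hAn]
      have hlast : ∀ x : Char, (c :: (ms ++ [x])).getLast? = some x := fun x => by
        rw [← List.cons_append, List.getLast?_concat]
      have hdrop : ∀ x : Char, (c :: (ms ++ [x])).dropLast = c :: ms := fun x => by
        rw [← List.cons_append, List.dropLast_concat]
      have hlast2 : ∀ x : Char, (ms ++ [x]).getLast? = some x := fun x => by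
        rw [List.getLast?_concat]
      have hdrop2 : ∀ x : Char, (ms ++ [x]).dropLast = ms := fun x => by
        rw [List.dropLast_concat]
      by_cases hc : c = '"' <;> by_cases hd : d = '"' <;>
        simp [hc, hd, hcs, hlast, hdrop, hlast2, hdrop2]

-- ===== VERDICT (by name: the statement is the Claim_ definition above) =====
theorem trataCaminho_spec : Claim_equal_trataCaminho := by
  intro s _
  unfold Spec_trataCaminho trataCaminho trataCaminho_alt
  simp only [pvFoldA, pvKey]
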